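-- pv_equiv track=rewrite | github.com/RanBezen/Genetic-and-SA-algorithms-for-combinatorial-optimization- | utils_comb.py | Gen_ending_selection
-- ===== SOURCE A (Python) =====
-- def Gen_ending_selection(A_vertices_population, phi,best_A,A_phi_lists):
--
--
--     final_As = []
--     final_phis = []
--     final_lens = []
--     for i in range(len(A_vertices_population)):
--         phi_tmp = A_phi_lists[i]
--         if phi_tmp >= phi:
--            final_As.append(A_vertices_population[i])
--            final_phis.append(phi_tmp)
--            final_lens.append(len(A_vertices_population[i]))
--
--     if final_lens:
--         max_indx = final_lens.index(max(final_lens))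
--         maxA_phi = final_phis[max_indx]
--         maxA_vertices = final_As[max_indx]
--     else:
--         maxA_phi = phi
--         maxA_vertices = best_A
--
--     return maxA_vertices, maxA_phi
-- ===== SOURCE B (Python) =====
-- def Gen_ending_selection(A_vertices_population, phi, best_A, A_phi_lists):
--     best = (best_A, phi)
--     best_len = -1
--     for verts, p in zip(A_vertices_population, A_phi_lists):
--         if p >= phi and len(verts) > best_len:
--             best = (verts, p)
--             best_len = len(verts)
--     return best
-- ===== Notes on version B (the rewrite author's own statement) =====
-- stated objective: simpler
-- what changed: Replaces the build-three-parallel-lists-then-max/index selection with a single pass over zip maintaining a running best (strict '>' keeps the first maximum, matching list.index(max(...))); the fallback (best_A, phi) is the loop's initial state.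
import Mathlib
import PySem

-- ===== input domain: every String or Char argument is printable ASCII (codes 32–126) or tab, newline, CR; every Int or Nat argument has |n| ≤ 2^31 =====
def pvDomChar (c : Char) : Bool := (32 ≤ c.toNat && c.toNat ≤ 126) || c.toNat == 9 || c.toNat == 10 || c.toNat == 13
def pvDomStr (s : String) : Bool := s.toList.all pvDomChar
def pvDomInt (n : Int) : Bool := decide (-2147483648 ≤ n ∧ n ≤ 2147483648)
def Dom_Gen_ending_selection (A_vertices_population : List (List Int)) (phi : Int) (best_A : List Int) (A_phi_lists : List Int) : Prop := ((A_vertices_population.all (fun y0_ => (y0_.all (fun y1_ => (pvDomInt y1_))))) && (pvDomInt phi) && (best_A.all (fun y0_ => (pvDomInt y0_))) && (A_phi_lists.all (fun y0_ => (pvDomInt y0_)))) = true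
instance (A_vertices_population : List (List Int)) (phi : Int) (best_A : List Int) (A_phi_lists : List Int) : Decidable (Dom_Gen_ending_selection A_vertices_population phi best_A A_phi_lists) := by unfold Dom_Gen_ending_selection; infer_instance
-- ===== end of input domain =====

-- B replaces A's filter-into-three-parallel-lists + max/index selection by a single running-best
-- pass over the zipped input (objective: simpler).

-- ===== PORT A =====
-- literal port of A: fold over range(len(pop)) building the three appended lists, then max/index
-- (aStep is A's loop body: phi_tmp = A_phi_lists[i]; if phi_tmp >= phi: append to the three lists)
def aStep (A_vertices_population : List (List Int)) (phi : Int) (A_phi_lists : List Int)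
    (acc : List (List Int) × List Int × List Int) (i : Int) : List (List Int) × List Int × List Int :=
  let phi_tmp := PySem.List.pyGetD A_phi_lists i 0   -- A_phi_lists[i]; IndexError excluded by Pre_
  if phi_tmp ≥ phi then
    (acc.1 ++ [PySem.List.pyGetD A_vertices_population i []],
     acc.2.1 ++ [phi_tmp],
     acc.2.2 ++ [((PySem.List.pyGetD A_vertices_population i []).length : Int)])
  else acc

def Gen_ending_selection (A_vertices_population : List (List Int)) (phi : Int) (best_A : List Int) (A_phi_lists : List Int) : List Int × Int :=
  let st := (PySem.List.pyRange 0 A_vertices_population.length 1).foldl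
    (aStep A_vertices_population phi A_phi_lists) ([], [], [])
  if st.2.2 ≠ [] then
    let m := (PySem.List.max? st.2.2 (fun y => y)).getD 0
    let max_indx := (PySem.List.index? st.2.2 m).getD 0
    (PySem.List.pyGetD st.1 (max_indx : Int) [], PySem.List.pyGetD st.2.1 (max_indx : Int) 0)
  else (best_A, phi)

-- ===== PORT B =====
def bLoop (phi : Int) : List (List Int × Int) → (List Int × Int) → Int → (List Int × Int)
  | [], best, _ => best
  | (v, p) :: rest, best, best_len =>
      if phi ≤ p ∧ best_len < (v.length : Int) then bLoop phi rest (v, p) (v.length : Int)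
      else bLoop phi rest best best_len

def Gen_ending_selection_alt (A_vertices_population : List (List Int)) (phi : Int) (best_A : List Int) (A_phi_lists : List Int) : List Int × Int :=
  bLoop phi (A_vertices_population.zip A_phi_lists) (best_A, phi) (-1)

-- ===== PRECONDITION & SPEC =====
-- Pre_ excludes exactly the inputs where A raises IndexError: A reads A_phi_lists[i] for every
-- i < len(A_vertices_population).
def Pre_Gen_ending_selection (A_vertices_population : List (List Int)) (phi : Int) (best_A : List Int) (A_phi_lists : List Int) : Prop :=
  A_vertices_population.length ≤ A_phi_lists.length
instance (A_vertices_population : List (List Int)) (phi : Int) (best_A : List Int) (A_phi_lists : List Int) : Decidable (Pre_Gen_ending_selection A_vertices_population phi best_A A_phi_lists) := by unfold Pre_Gen_ending_selection; infer_instance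

def pvWitness_Gen_ending_selection : List (List Int) × Int × List Int × List Int := ([[1, 2], [3]], 0, [9], [1, 5])

def Spec_Gen_ending_selection (A_vertices_population : List (List Int)) (phi : Int) (best_A : List Int) (A_phi_lists : List Int) (out : List Int × Int) : Prop := out = Gen_ending_selection_alt A_vertices_population phi best_A A_phi_lists
instance (A_vertices_population : List (List Int)) (phi : Int) (best_A : List Int) (A_phi_lists : List Int) (out : List Int × Int) : Decidable (Spec_Gen_ending_selection A_vertices_population phi best_A A_phi_lists out) := by unfold Spec_Gen_ending_selection; infer_instance

-- ===== CLAIM (what is proved, stated in full; the proofs are below) =====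
def Claim_equal_Gen_ending_selection : Prop := ∀ (A_vertices_population : List (List Int)) (phi : Int) (best_A : List Int) (A_phi_lists : List Int), Dom_Gen_ending_selection A_vertices_population phi best_A A_phi_lists → Pre_Gen_ending_selection A_vertices_population phi best_A A_phi_lists → Spec_Gen_ending_selection A_vertices_population phi best_A A_phi_lists (Gen_ending_selection A_vertices_population phi best_A A_phi_lists)

-- ===== LEMMAS AND PROOFS =====

-- the filtered list of (vertices, phi) pairs both programs effectively select from
def fil (pop : List (List Int)) (phis : List Int) (phi : Int) : List (List Int × Int) :=
  (pop.zip phis).filter (fun x => decide (phi ≤ x.2))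

def lenI (x : List Int × Int) : Int := (x.1.length : Int)

-- A's selection tail, applied to the three parallel lists fs.map fst / fs.map snd / fs.map lenI
def aSel (fs : List (List Int × Int)) (b0 : List Int × Int) : List Int × Int :=
  if fs.map lenI ≠ [] then
    let m := (PySem.List.max? (fs.map lenI) (fun y => y)).getD 0
    let max_indx := (PySem.List.index? (fs.map lenI) m).getD 0
    (PySem.List.pyGetD (fs.map (·.1)) (max_indx : Int) [], PySem.List.pyGetD (fs.map (·.2)) (max_indx : Int) 0)
  else b0

-- B's loop as a foldl carrying the (best, best_len) state
def bStep (phi : Int) (s : (List Int × Int) × Int) (x : List Int × Int) : (List Int × Int) × Int :=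
  if phi ≤ x.2 ∧ s.2 < lenI x then ((x.1, x.2), lenI x) else s

def mxl (fs : List (List Int × Int)) : Int := (fs.map lenI).foldl max (-1)

theorem getD_concat_self {α : Type} (l : List α) (a d : α) (n : Nat) (hn : n = l.length) :
    (l ++ [a]).getD n d = a := by subst hn; simp [List.getD]

theorem getD_append_left' {α : Type} (l l' : List α) (d : α) (n : Nat) (hn : n < l.length) :
    (l ++ l').getD n d = l.getD n d := by simp [List.getD, List.getElem?_append_left hn]

theorem bLoop_eq_foldl (phi : Int) (l : List (List Int × Int)) (b : List Int × Int) (bl : Int) :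
    bLoop phi l b bl = (l.foldl (bStep phi) (b, bl)).1 := by
  induction l generalizing b bl with
  | nil => rfl
  | cons x t ih =>
    obtain ⟨v, p⟩ := x
    simp only [bLoop, List.foldl_cons, bStep, lenI]
    split_ifs with h <;> simp_all

theorem foldl_bStep_filter (phi : Int) (l : List (List Int × Int)) (s : (List Int × Int) × Int) :
    l.foldl (bStep phi) s = (l.filter (fun x => decide (phi ≤ x.2))).foldl (bStep phi) s := by
  induction l generalizing s with
  | nil => rfl
  | cons x t ih =>
    by_cases h : phi ≤ x.2
    · simp [List.filter_cons, h, ih]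
    · have hx : bStep phi s x = s := by simp [bStep, h]
      simp [List.filter_cons, h, ih, hx]

theorem mxl_append (fs : List (List Int × Int)) (x : List Int × Int) :
    mxl (fs ++ [x]) = max (mxl fs) (lenI x) := by
  simp [mxl, List.foldl_append]

theorem mxl_nonneg_bound (fs : List (List Int × Int)) : -1 ≤ mxl fs ∧ ∀ y ∈ fs.map lenI, y ≤ mxl fs := by
  simpa [mxl] using PySem.List.le_foldl_max (fs.map lenI) (-1)

theorem mxl_eq_max? (fs : List (List Int × Int)) (h : fs ≠ []) :
    PySem.List.max? (fs.map lenI) (fun y => y) = some (mxl fs) := by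
  obtain ⟨x, t, rfl⟩ := List.exists_cons_of_ne_nil h
  rw [List.map_cons, PySem.List.max?_id_cons]
  have hx : max (-1) (lenI x) = lenI x := by
    have : (0:Int) ≤ lenI x := by simp [lenI]
    omega
  simp [mxl, hx]

-- the invariant: B's fold state over the (already filtered) list is (A's selection, running max)
theorem main_inv (phi : Int) (fs : List (List Int × Int)) (hall : ∀ x ∈ fs, phi ≤ x.2)
    (b0 : List Int × Int) :
    fs.foldl (bStep phi) (b0, -1) = (aSel fs b0, mxl fs) := by
  induction fs using List.reverseRecOn with
  | nil => simp [aSel, mxl]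
  | append_singleton t x ih =>
    have hallt : ∀ y ∈ t, phi ≤ y.2 := fun y hy => hall y (by simp [hy])
    have hp : phi ≤ x.2 := hall x (by simp)
    rw [List.foldl_append, ih hallt, List.foldl_cons, List.foldl_nil]
    by_cases hgt : mxl t < lenI x
    · -- x strictly beats everything before it: new max, new first argmax at position t.length
      have hnotmem : lenI x ∉ t.map lenI := by
        intro hm
        have := (mxl_nonneg_bound t).2 _ hm
        omega
      have hm' : mxl (t ++ [x]) = lenI x := by
        rw [mxl_append]; omega
      have hmax : (PySem.List.max? ((t ++ [x]).map lenI) (fun y => y)).getD 0 = lenI x := by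
        rw [mxl_eq_max? _ (by simp)]; simp [hm']
      have hidx : PySem.List.index? ((t ++ [x]).map lenI) (lenI x) = some (t.map lenI).length := by
        rw [List.map_append, List.map_cons, List.map_nil]
        exact PySem.List.index?_append_singleton_self (t.map lenI) (lenI x) hnotmem
      simp only [bStep, hp, hgt, and_self, if_true]
      rw [hm']
      congr 1
      simp only [aSel]
      rw [if_pos (by simp), hmax, hidx]
      simp only [Option.getD_some, PySem.List.pyGetD_natCast, List.map_append, List.map_cons,
        List.map_nil, List.length_map]
      rw [getD_concat_self _ _ _ _ (by simp), getD_concat_self _ _ _ _ (by simp)]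
    · -- x does not beat the running max: state unchanged, and aSel picks the same earlier element
      have hxnn : (0:Int) ≤ lenI x := by simp [lenI]
      have hne : t ≠ [] := by
        intro h; subst h
        simp [mxl] at hgt; omega
      have hm' : mxl (t ++ [x]) = mxl t := by rw [mxl_append]; omega
      have hstep : bStep phi (aSel t b0, mxl t) x = (aSel t b0, mxl t) := by
        simp only [bStep]
        rw [if_neg]; rintro ⟨_, h2⟩; exact hgt h2
      rw [hstep, hm']
      congr 1
      -- max unchanged, and its first index lies in t, so all three lookups hit the prefix
      have hmem : mxl t ∈ t.map lenI := by
        have := PySem.List.max?_mem (mxl_eq_max? t hne)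
        simpa using this
      have hmaxt : (PySem.List.max? (t.map lenI) (fun y => y)).getD 0 = mxl t := by
        rw [mxl_eq_max? t hne]; rfl
      have hmax : (PySem.List.max? ((t ++ [x]).map lenI) (fun y => y)).getD 0 = mxl t := by
        rw [mxl_eq_max? _ (by simp), hm']; rfl
      have hidx : PySem.List.index? ((t ++ [x]).map lenI) (mxl t)
          = PySem.List.index? (t.map lenI) (mxl t) := by
        rw [List.map_append]
        exact PySem.List.index?_append_of_mem _ hmem
      obtain ⟨k, hk⟩ : ∃ k, PySem.List.index? (t.map lenI) (mxl t) = some k := by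
        cases hidx2 : PySem.List.index? (t.map lenI) (mxl t) with
        | none => exact absurd ((PySem.List.index?_eq_none_iff _ _).mp hidx2) (by simp; simpa using hmem)
        | some k => exact ⟨k, rfl⟩
      obtain ⟨hklt, -, -⟩ := PySem.List.getElem_of_index?_eq_some hk
      simp only [aSel]
      rw [if_pos (by simp [hne]), if_pos (by simp [hne]), hmax, hmaxt, hidx, hk]
      simp only [Option.getD_some, PySem.List.pyGetD_natCast, List.map_append, List.length_map]
      rw [getD_append_left' _ _ _ _ (by simpa using hklt),
        getD_append_left' _ _ _ _ (by simpa using hklt)]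

-- A's index-building loop produces exactly the three parallel projections of the filtered zip
theorem build_eq (pop : List (List Int)) (phis : List Int) (phi : Int)
    (hpre : pop.length ≤ phis.length) (k : Nat) :
    ∀ (i : Nat) (acc : List (List Int) × List Int × List Int), pop.length - i = k →
    (PySem.List.pyRange (i : Int) (pop.length : Int) 1).foldl (aStep pop phi phis) acc
    = (acc.1 ++ (((pop.zip phis).drop i).filter (fun x => decide (phi ≤ x.2))).map (fun x => x.1),
       acc.2.1 ++ (((pop.zip phis).drop i).filter (fun x => decide (phi ≤ x.2))).map (fun x => x.2),
       acc.2.2 ++ (((pop.zip phis).drop i).filter (fun x => decide (phi ≤ x.2))).map lenI) := by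
  induction k with
  | zero =>
    intro i acc hik
    have hge : pop.length ≤ i := by omega
    have hzlen : (pop.zip phis).length = pop.length := by
      simp [List.length_zip]; omega
    rw [PySem.List.pyRange_one_eq_nil (by exact_mod_cast hge), List.foldl_nil,
      List.drop_eq_nil_of_le (by omega)]
    simp
  | succ n ih =>
    intro i acc hik
    have hlt : i < pop.length := by omega
    have hlt' : i < phis.length := by omega
    have hzlt : i < (pop.zip phis).length := by simp [List.length_zip]; omega
    rw [PySem.List.pyRange_one_cons (by exact_mod_cast hlt), List.foldl_cons]
    have hcast : ((i : Int) + 1) = ((i + 1 : Nat) : Int) := by push_cast; ring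
    rw [hcast, ih (i + 1) _ (by omega)]
    rw [List.drop_eq_getElem_cons hzlt, List.getElem_zip]
    have hg1 : PySem.List.pyGetD phis (i : Int) 0 = phis[i] := by
      rw [PySem.List.pyGetD_natCast, List.getD_eq_getElem?_getD, List.getElem?_eq_getElem hlt']
      rfl
    have hg2 : PySem.List.pyGetD pop (i : Int) [] = pop[i] := by
      rw [PySem.List.pyGetD_natCast, List.getD_eq_getElem?_getD, List.getElem?_eq_getElem hlt]
      rfl
    simp only [aStep, hg1, hg2, List.filter_cons]
    by_cases hc : phi ≤ phis[i]
    · simp [hc, ge_iff_le, lenI, List.append_assoc]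
    · simp [hc, ge_iff_le]

-- assembling the two sides
theorem a_eq_aSel (pop : List (List Int)) (phi : Int) (bA : List Int) (phis : List Int)
    (hpre : pop.length ≤ phis.length) :
    Gen_ending_selection pop phi bA phis = aSel (fil pop phis phi) (bA, phi) := by
  have h := build_eq pop phis phi hpre pop.length 0 ([], [], []) rfl
  unfold Gen_ending_selection
  rw [show ((0 : Int)) = ((0 : Nat) : Int) from rfl, h]
  simp only [List.drop_zero, List.nil_append]
  rfl

theorem b_eq_aSel (pop : List (List Int)) (phi : Int) (bA : List Int) (phis : List Int) :
    Gen_ending_selection_alt pop phi bA phis = aSel (fil pop phis phi) (bA, phi) := by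
  unfold Gen_ending_selection_alt
  rw [bLoop_eq_foldl, foldl_bStep_filter]
  rw [main_inv phi _ (fun x hx => by
    have := List.of_mem_filter hx
    simpa using this) (bA, phi)]
  rfl

-- ===== VERDICT (by name: the statement is the Claim_ definition above) =====
theorem Gen_ending_selection_spec : Claim_equal_Gen_ending_selection := by
  intro pop phi bA phis _ hpre
  unfold Spec_Gen_ending_selection
  rw [a_eq_aSel pop phi bA phis hpre, b_eq_aSel]
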